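-- pv_equiv track=rewrite | github.com/vihaan69-420/GST-scanner | src/exports/gstr1_exporter.py | _format_b2b_rows
-- ===== SOURCE A (Python) =====
-- from typing import Dict, List, Optional
--
-- def _format_b2b_rows(invoices: List[Dict]) -> List[List[str]]:
--     rows = []
--     for inv in invoices:
--         rows.append([
--             inv.get('Buyer_GSTIN', ''),
--             inv.get('Buyer_Name', ''),
--             inv.get('Invoice_No', ''),
--             inv.get('Invoice_Date', ''),
--             inv.get('Invoice_Value', ''),
--             inv.get('Place_Of_Supply', ''),
--             inv.get('Reverse_Charge', 'N'),
--             inv.get('Invoice_Type', 'Regular'),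
--             inv.get('Total_GST', ''),
--             inv.get('Total_Taxable_Value', ''),
--             '0',
--             inv.get('IGST_Total', '0'),
--             inv.get('CGST_Total', '0'),
--             inv.get('SGST_Total', '0'),
--         ])
--     return rows
-- ===== SOURCE B (Python) =====
-- from typing import Dict, List, Optional
--
-- # Inverted strategy: instead of doing 14 keyed lookups per invoice, start from the
-- # constant default row and scatter the invoice's own items into it via a key->column map.
-- _COL_INDEX = {'Buyer_GSTIN': 0, 'Buyer_Name': 1, 'Invoice_No': 2, 'Invoice_Date': 3,
--               'Invoice_Value': 4, 'Place_Of_Supply': 5, 'Reverse_Charge': 6,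
--               'Invoice_Type': 7, 'Total_GST': 8, 'Total_Taxable_Value': 9,
--               'IGST_Total': 11, 'CGST_Total': 12, 'SGST_Total': 13}
-- _DEFAULT_ROW = ['', '', '', '', '', '', 'N', 'Regular', '', '', '0', '0', '0', '0']
--
-- def _format_b2b_rows(invoices: List[Dict]) -> List[List[str]]:
--     rows = []
--     for inv in invoices:
--         row = _DEFAULT_ROW.copy()
--         for key, value in inv.items():
--             idx = _COL_INDEX.get(key)
--             if idx is not None:
--                 row[idx] = value
--         rows.append(row)
--     return rows
-- ===== Notes on version B (the rewrite author's own statement) =====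
-- stated objective: alternative
-- what changed: Inverted the data flow: instead of 14 keyed dict lookups per invoice, B copies a constant default row and makes one pass over the invoice's items, scattering each recognised key's value into its column via a key->index map (the hardcoded '0' column has no key and keeps its default).
import Mathlib
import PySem

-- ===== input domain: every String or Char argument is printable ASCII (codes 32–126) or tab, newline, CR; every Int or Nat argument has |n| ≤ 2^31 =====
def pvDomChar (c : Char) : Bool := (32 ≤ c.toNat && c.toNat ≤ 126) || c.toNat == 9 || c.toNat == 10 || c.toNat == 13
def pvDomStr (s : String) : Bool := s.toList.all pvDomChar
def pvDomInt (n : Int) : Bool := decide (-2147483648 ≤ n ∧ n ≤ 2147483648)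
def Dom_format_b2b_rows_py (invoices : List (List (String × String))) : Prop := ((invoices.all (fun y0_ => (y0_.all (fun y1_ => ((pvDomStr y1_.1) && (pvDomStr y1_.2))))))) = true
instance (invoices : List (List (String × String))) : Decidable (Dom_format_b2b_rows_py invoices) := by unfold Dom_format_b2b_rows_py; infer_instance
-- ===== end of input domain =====

-- B inverts the data flow: instead of 14 keyed lookups per invoice it copies a constant default
-- row and scatters the invoice's own items into it via a key->column index map (alternative; same cost).

-- ===== PORT A =====
-- rows = []; for inv in invoices: rows.append([... 14 inv.get(...) entries ...]); return rows
def format_b2b_rows_py (invoices : List (List (String × String))) : List (List String) :=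
  invoices.foldl (fun rows inv =>
    let d := PySem.Dict.ofList inv
    rows ++ [[
      d.getD "Buyer_GSTIN" "",
      d.getD "Buyer_Name" "",
      d.getD "Invoice_No" "",
      d.getD "Invoice_Date" "",
      d.getD "Invoice_Value" "",
      d.getD "Place_Of_Supply" "",
      d.getD "Reverse_Charge" "N",
      d.getD "Invoice_Type" "Regular",
      d.getD "Total_GST" "",
      d.getD "Total_Taxable_Value" "",
      "0",
      d.getD "IGST_Total" "0",
      d.getD "CGST_Total" "0",
      d.getD "SGST_Total" "0"]]) []

-- ===== PORT B =====
-- _COL_INDEX : key -> column index (column 10, the literal '0', has no key)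
def b2bColIndex : PySem.Dict String Nat :=
  PySem.Dict.ofList
    [("Buyer_GSTIN", 0), ("Buyer_Name", 1), ("Invoice_No", 2), ("Invoice_Date", 3),
     ("Invoice_Value", 4), ("Place_Of_Supply", 5), ("Reverse_Charge", 6),
     ("Invoice_Type", 7), ("Total_GST", 8), ("Total_Taxable_Value", 9),
     ("IGST_Total", 11), ("CGST_Total", 12), ("SGST_Total", 13)]

def b2bDefaultRow : List String :=
  ["", "", "", "", "", "", "N", "Regular", "", "", "0", "0", "0", "0"]

-- row = _DEFAULT_ROW.copy(); for key, value in inv.items(): if key in map: row[idx] = value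
def b2bFillRow (inv : List (String × String)) : List String :=
  inv.foldl (fun row kv =>
    match b2bColIndex.get? kv.1 with
    | some idx => row.set idx kv.2
    | none => row) b2bDefaultRow

def format_b2b_rows_py_alt (invoices : List (List (String × String))) : List (List String) :=
  invoices.foldl (fun rows inv => rows ++ [b2bFillRow inv]) []

-- ===== PRECONDITION & SPEC =====
def Spec_format_b2b_rows_py (invoices : List (List (String × String))) (out : List (List String)) : Prop := out = format_b2b_rows_py_alt invoices
instance (invoices : List (List (String × String))) (out : List (List String)) : Decidable (Spec_format_b2b_rows_py invoices out) := by unfold Spec_format_b2b_rows_py; infer_instance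

-- ===== CLAIM =====
def Claim_equal_format_b2b_rows_py : Prop := ∀ (invoices : List (List (String × String))), Dom_format_b2b_rows_py invoices → Spec_format_b2b_rows_py invoices (format_b2b_rows_py invoices)

-- ===== LEMMAS AND PROOFS =====
theorem ofList_append_singleton (xs : List (String × String)) (p : String × String) :
    PySem.Dict.ofList (xs ++ [p]) = (PySem.Dict.ofList xs).insert p.1 p.2 := by
  simp [PySem.Dict.ofList, PySem.Dict.update, List.foldl_append]

-- the filled row is exactly the row of last-wins lookups with the spec defaults
theorem fillRow_eq (inv : List (String × String)) :
    b2bFillRow inv =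
      (let d := PySem.Dict.ofList inv
       [d.getD "Buyer_GSTIN" "", d.getD "Buyer_Name" "", d.getD "Invoice_No" "",
        d.getD "Invoice_Date" "", d.getD "Invoice_Value" "", d.getD "Place_Of_Supply" "",
        d.getD "Reverse_Charge" "N", d.getD "Invoice_Type" "Regular", d.getD "Total_GST" "",
        d.getD "Total_Taxable_Value" "", "0", d.getD "IGST_Total" "0",
        d.getD "CGST_Total" "0", d.getD "SGST_Total" "0"]) := by
  unfold b2bFillRow
  induction inv using List.reverseRecOn with
  | nil => simp [b2bDefaultRow, PySem.Dict.ofList, PySem.Dict.update, PySem.Dict.getD_empty]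
  | append_singleton xs p ih =>
    rw [List.foldl_append, ih, ofList_append_singleton]
    obtain ⟨k, v⟩ := p
    by_cases h0 : k = "Buyer_GSTIN"
    · subst h0; simp [b2bColIndex, PySem.Dict.ofList, PySem.Dict.update, List.foldl, PySem.Dict.get?_insert, PySem.Dict.getD_insert, List.set]
    by_cases h1 : k = "Buyer_Name"
    · subst h1; simp [b2bColIndex, PySem.Dict.ofList, PySem.Dict.update, List.foldl, PySem.Dict.get?_insert, PySem.Dict.getD_insert, List.set]
    by_cases h2 : k = "Invoice_No"
    · subst h2; simp [b2bColIndex, PySem.Dict.ofList, PySem.Dict.update, List.foldl, PySem.Dict.get?_insert, PySem.Dict.getD_insert, List.set]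
    by_cases h3 : k = "Invoice_Date"
    · subst h3; simp [b2bColIndex, PySem.Dict.ofList, PySem.Dict.update, List.foldl, PySem.Dict.get?_insert, PySem.Dict.getD_insert, List.set]
    by_cases h4 : k = "Invoice_Value"
    · subst h4; simp [b2bColIndex, PySem.Dict.ofList, PySem.Dict.update, List.foldl, PySem.Dict.get?_insert, PySem.Dict.getD_insert, List.set]
    by_cases h5 : k = "Place_Of_Supply"
    · subst h5; simp [b2bColIndex, PySem.Dict.ofList, PySem.Dict.update, List.foldl, PySem.Dict.get?_insert, PySem.Dict.getD_insert, List.set]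
    by_cases h6 : k = "Reverse_Charge"
    · subst h6; simp [b2bColIndex, PySem.Dict.ofList, PySem.Dict.update, List.foldl, PySem.Dict.get?_insert, PySem.Dict.getD_insert, List.set]
    by_cases h7 : k = "Invoice_Type"
    · subst h7; simp [b2bColIndex, PySem.Dict.ofList, PySem.Dict.update, List.foldl, PySem.Dict.get?_insert, PySem.Dict.getD_insert, List.set]
    by_cases h8 : k = "Total_GST"
    · subst h8; simp [b2bColIndex, PySem.Dict.ofList, PySem.Dict.update, List.foldl, PySem.Dict.get?_insert, PySem.Dict.getD_insert, List.set]
    by_cases h9 : k = "Total_Taxable_Value"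
    · subst h9; simp [b2bColIndex, PySem.Dict.ofList, PySem.Dict.update, List.foldl, PySem.Dict.get?_insert, PySem.Dict.getD_insert, List.set]
    by_cases h10 : k = "IGST_Total"
    · subst h10; simp [b2bColIndex, PySem.Dict.ofList, PySem.Dict.update, List.foldl, PySem.Dict.get?_insert, PySem.Dict.getD_insert, List.set]
    by_cases h11 : k = "CGST_Total"
    · subst h11; simp [b2bColIndex, PySem.Dict.ofList, PySem.Dict.update, List.foldl, PySem.Dict.get?_insert, PySem.Dict.getD_insert, List.set]
    by_cases h12 : k = "SGST_Total"
    · subst h12; simp [b2bColIndex, PySem.Dict.ofList, PySem.Dict.update, List.foldl, PySem.Dict.get?_insert, PySem.Dict.getD_insert, List.set]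
    · simp [b2bColIndex, PySem.Dict.ofList, PySem.Dict.update, List.foldl, PySem.Dict.get?_insert, PySem.Dict.get?_empty, PySem.Dict.getD_insert, Ne.symm h0, h0, h1, h2, h3, h4, h5, h6, h7, h8, h9, h10, h11, h12, Ne.symm h1, Ne.symm h2, Ne.symm h3, Ne.symm h4, Ne.symm h5, Ne.symm h6, Ne.symm h7, Ne.symm h8, Ne.symm h9, Ne.symm h10, Ne.symm h11, Ne.symm h12]

theorem foldl_append_singleton_map {α β : Type} (f : α → β) (l : List α) (acc : List β) :
    l.foldl (fun r x => r ++ [f x]) acc = acc ++ l.map f := by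
  induction l generalizing acc with
  | nil => simp
  | cons x xs ih => simp [List.foldl, ih, List.append_assoc]

-- ===== VERDICT =====
theorem format_b2b_rows_py_spec : Claim_equal_format_b2b_rows_py := by
  intro invoices _
  unfold Spec_format_b2b_rows_py format_b2b_rows_py format_b2b_rows_py_alt
  rw [foldl_append_singleton_map (f := b2bFillRow),
      foldl_append_singleton_map]
  simp only [List.nil_append]
  apply List.map_congr_left
  intro inv _
  rw [fillRow_eq]
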